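-- pv_equiv track=rewrite | github.com/benogeorge/lab4-word-game | main.py | _incorrect_letters_rec
-- ===== SOURCE A (Python) =====
-- def _word_contains(word: str, ch: str, index: int = 0) -> bool:
--     if index >= len(word):
--         return False
--     if word[index] == ch:
--         return True
--     return _word_contains(word, ch, index + 1)
--
-- def _list_contains(items: list[str], value: str, index: int = 0) -> bool:
--     if index >= len(items):
--         return False
--     if (items[index] or "").strip().lower() == value:
--         return True
--     return _list_contains(items, value, index + 1)
--
-- def _incorrect_letters_rec(secret_word: str, guessed_letters: list[str], index: int) -> list[str]:
--     if index >= len(guessed_letters):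
--         return []
--     g = (guessed_letters[index] or "").strip().lower()
--     rest = _incorrect_letters_rec(secret_word, guessed_letters, index + 1)
--     if not g:
--         return rest
--     if _word_contains(secret_word, g):
--         return rest
--     if _list_contains(rest, g):
--         return rest
--     return [g] + rest
-- ===== SOURCE B (Python) =====
-- def _incorrect_letters_rec(secret_word: str, guessed_letters: list[str], index: int) -> list[str]:
--     # Single forward pass instead of A's triple recursion (rebuild + recursive
--     # word scan + recursive dedup scan): precompute the secret's character set,
--     # then maintain last-occurrence dedup with remove+append.
--     secret_chars = set(secret_word)
--     result = []
--     for x in guessed_letters[max(index, 0):]: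
--         g = (x or "").strip().lower()
--         if not g or g in secret_chars:
--             continue
--         if g in result:
--             result.remove(g)
--         result.append(g)
--     return result
-- ===== Notes on version B (the rewrite author's own statement) =====
-- stated objective: faster
-- what changed: Replaces A's post-order recursion with its two recursive inner scans (character scan of the secret word and dedup scan of the partial result) by one forward loop over the guessed letters against a precomputed character set, maintaining last-occurrence dedup by remove+append; a negative start index is clamped to 0, which provably yields the same result as A's wraparound there.
import Mathlib
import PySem

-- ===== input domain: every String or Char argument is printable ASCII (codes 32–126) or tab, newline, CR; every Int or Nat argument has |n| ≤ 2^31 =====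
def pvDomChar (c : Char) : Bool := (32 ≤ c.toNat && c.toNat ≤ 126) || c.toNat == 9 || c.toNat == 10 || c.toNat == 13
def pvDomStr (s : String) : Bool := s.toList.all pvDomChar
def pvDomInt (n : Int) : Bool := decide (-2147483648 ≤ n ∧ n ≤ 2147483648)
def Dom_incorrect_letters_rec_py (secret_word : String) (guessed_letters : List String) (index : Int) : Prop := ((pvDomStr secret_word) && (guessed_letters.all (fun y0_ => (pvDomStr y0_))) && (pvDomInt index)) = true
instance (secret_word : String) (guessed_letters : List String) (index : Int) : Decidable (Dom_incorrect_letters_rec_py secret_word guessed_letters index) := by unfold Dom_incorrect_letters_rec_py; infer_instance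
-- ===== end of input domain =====

-- B replaces A's post-order recursion (with two recursive inner scans) by one forward
-- loop over the guessed letters against a precomputed secret character set, keeping
-- last-occurrence dedup by remove+append; objective: faster (no recursion, set lookup).

-- ===== PORT A =====
-- shared helper: (x or "").strip().lower() — `x or ""` is the identity on str values
def pvNorm (x : String) : String := PySem.Str.lower (PySem.Str.strip x)

-- _word_contains(word, ch, index)
def pvWordContains (word : String) (ch : String) (index : Int) : Bool :=
  if _h : index ≥ PySem.Str.len word then false
  else
    match PySem.Str.pyGet? word index with
    | some c => if String.singleton c = ch then true else pvWordContains word ch (index + 1)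
    | none => false   -- IndexError; unreachable from A's call sites (index starts at 0)
termination_by (PySem.Str.len word - index).toNat
decreasing_by simp only [PySem.Str.len] at *; omega

-- _list_contains(items, value, index)
def pvListContains (items : List String) (value : String) (index : Int) : Bool :=
  if _h : index ≥ (items.length : Int) then false
  else
    match PySem.List.pyGet? items index with
    | some x => if pvNorm x = value then true else pvListContains items value (index + 1)
    | none => false   -- IndexError; unreachable from A's call sites (index starts at 0)
termination_by ((items.length : Int) - index).toNat
decreasing_by omega

def incorrect_letters_rec_py (secret_word : String) (guessed_letters : List String) (index : Int) : List String :=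
  if _h : index ≥ (guessed_letters.length : Int) then []
  else
    match PySem.List.pyGet? guessed_letters index with
    | some x =>
      let g := pvNorm x
      let rest := incorrect_letters_rec_py secret_word guessed_letters (index + 1)
      if g = "" then rest
      else if pvWordContains secret_word g 0 then rest
      else if pvListContains rest g 0 then rest
      else g :: rest
    | none => []   -- IndexError (index < -len); excluded by Pre_
termination_by ((guessed_letters.length : Int) - index).toNat
decreasing_by omega

-- ===== PORT B =====
def incorrect_letters_rec_py_alt (secret_word : String) (guessed_letters : List String) (index : Int) : List String :=
  let secretChars : PySem.Set String := PySem.Set.ofList (secret_word.toList.map (fun c => String.singleton c))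
  (PySem.List.slice guessed_letters (some (max index 0)) none).foldl
    (fun res x =>
      let g := pvNorm x
      if g = "" || PySem.Set.contains secretChars g then res
      else
        let res1 := if res.contains g then (PySem.List.remove? res g).getD res else res
        res1 ++ [g])
    []

-- ===== PRECONDITION & SPEC =====
-- A raises IndexError exactly when index < -len(guessed_letters) (the first wrapped access).
def Pre_incorrect_letters_rec_py (secret_word : String) (guessed_letters : List String) (index : Int) : Prop :=
  -(guessed_letters.length : Int) ≤ index
instance (secret_word : String) (guessed_letters : List String) (index : Int) : Decidable (Pre_incorrect_letters_rec_py secret_word guessed_letters index) := by unfold Pre_incorrect_letters_rec_py; infer_instance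

def pvWitness_incorrect_letters_rec_py : String × List String × Int := ("cat", ["x", " A ", "x", "yz"], 0)

def Spec_incorrect_letters_rec_py (secret_word : String) (guessed_letters : List String) (index : Int) (out : List String) : Prop := out = incorrect_letters_rec_py_alt secret_word guessed_letters index
instance (secret_word : String) (guessed_letters : List String) (index : Int) (out : List String) : Decidable (Spec_incorrect_letters_rec_py secret_word guessed_letters index out) := by unfold Spec_incorrect_letters_rec_py; infer_instance

-- ===== CLAIM (what is proved, stated in full; the proofs are below) =====
def Claim_equal_incorrect_letters_rec_py : Prop := ∀ (secret_word : String) (guessed_letters : List String) (index : Int), Dom_incorrect_letters_rec_py secret_word guessed_letters index → Pre_incorrect_letters_rec_py secret_word guessed_letters index → Spec_incorrect_letters_rec_py secret_word guessed_letters index (incorrect_letters_rec_py secret_word guessed_letters index)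


-- ===== LEMMAS AND PROOFS =====
theorem lchar_toNat (c : Char) (h : PySem.Chars.isupper c = true) :
    (PySem.Chars.lowerChar c).toNat = c.toNat + 32 ∧ 65 ≤ c.toNat ∧ c.toNat ≤ 90 := by
  simp [PySem.Chars.isupper] at h
  obtain ⟨h1, h2⟩ := h
  have h1' : 65 ≤ c.toNat := Nat.succ_le_of_lt h1
  have h2' : c.toNat ≤ 90 := Fin.mk_le_mk.mp h2
  refine ⟨?_, h1', h2'⟩
  simp [PySem.Chars.lowerChar, PySem.Chars.isupper, h1, h2]
  rw [Char.toNat_ofNat]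
  have : Nat.isValidChar (c.toNat + 32) := by left; omega
  simp [this]

theorem isspace_lowerChar (c : Char) :
    PySem.Chars.isspace (PySem.Chars.lowerChar c) = PySem.Chars.isspace c := by
  by_cases h : PySem.Chars.isupper c
  · obtain ⟨ht, h1, h2⟩ := lchar_toNat c h
    have hs1 : PySem.Chars.isspace c = false := by simp [PySem.Chars.isspace]; omega
    have hs2 : PySem.Chars.isspace (PySem.Chars.lowerChar c) = false := by
      simp [PySem.Chars.isspace, ht]; omega
    rw [hs1, hs2]
  · simp [PySem.Chars.lowerChar, h]

theorem lchar_idem (c : Char) :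
    PySem.Chars.lowerChar (PySem.Chars.lowerChar c) = PySem.Chars.lowerChar c := by
  by_cases h : PySem.Chars.isupper c
  · obtain ⟨ht, h1, h2⟩ := lchar_toNat c h
    have hu : PySem.Chars.isupper (PySem.Chars.lowerChar c) = false := by
      simp [PySem.Chars.isupper]
      intro _
      refine Char.lt_def.mpr (UInt32.lt_iff_toNat_lt.mpr ?_)
      show ('Z').toNat < (PySem.Chars.lowerChar c).toNat
      have hz : ('Z').toNat = 90 := by decide
      omega
    conv_lhs => rw [PySem.Chars.lowerChar]
    simp [hu]
  · simp [PySem.Chars.lowerChar, h]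

theorem isspace_comp_lower : (PySem.Chars.isspace ∘ PySem.Chars.lowerChar) = PySem.Chars.isspace :=
  funext isspace_lowerChar

theorem lstrip_lower (l : List Char) :
    PySem.Chars.lstrip (PySem.Chars.lower l) = PySem.Chars.lower (PySem.Chars.lstrip l) := by
  simp [PySem.Chars.lstrip, PySem.Chars.lower, List.dropWhile_map, isspace_comp_lower]

theorem rstrip_lower (l : List Char) :
    PySem.Chars.rstrip (PySem.Chars.lower l) = PySem.Chars.lower (PySem.Chars.rstrip l) := by
  simp [PySem.Chars.rstrip, PySem.Chars.lower, List.dropWhile_map, isspace_comp_lower,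
    ← List.map_reverse]

theorem lower_lower (l : List Char) :
    PySem.Chars.lower (PySem.Chars.lower l) = PySem.Chars.lower l := by
  simp [PySem.Chars.lower, List.map_map, Function.comp_def, lchar_idem]

theorem lstrip_of_prefix {m k : List Char} (h : PySem.Chars.lstrip m = m) (hp : k <+: m) :
    PySem.Chars.lstrip k = k := by
  cases k with
  | nil => rfl
  | cons a k' =>
    obtain ⟨t, ht⟩ := hp
    subst ht
    unfold PySem.Chars.lstrip at h ⊢
    rw [List.cons_append] at h
    rw [List.dropWhile_cons] at h ⊢
    split_ifs with hs
    · exfalso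
      rw [if_pos hs] at h
      have := congrArg List.length h
      have hlen := (List.dropWhile_suffix (l := k' ++ t) PySem.Chars.isspace).length_le
      simp [List.length_append] at this hlen; omega
    · rfl

theorem rstrip_prefix (m : List Char) : PySem.Chars.rstrip m <+: m := by
  unfold PySem.Chars.rstrip
  rw [← List.reverse_suffix]
  simpa using List.dropWhile_suffix PySem.Chars.isspace

theorem lstrip_idem (l : List Char) :
    PySem.Chars.lstrip (PySem.Chars.lstrip l) = PySem.Chars.lstrip l := by
  simp [PySem.Chars.lstrip, List.dropWhile_idempotent]

theorem rstrip_idem (l : List Char) :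
    PySem.Chars.rstrip (PySem.Chars.rstrip l) = PySem.Chars.rstrip l := by
  simp [PySem.Chars.rstrip, List.dropWhile_idempotent]

theorem strip_fix (l : List Char) :
    PySem.Chars.strip (PySem.Chars.strip l) = PySem.Chars.strip l := by
  unfold PySem.Chars.strip
  have h1 : PySem.Chars.lstrip (PySem.Chars.rstrip (PySem.Chars.lstrip l)) =
      PySem.Chars.rstrip (PySem.Chars.lstrip l) :=
    lstrip_of_prefix (lstrip_idem l) (rstrip_prefix _)
  rw [h1, rstrip_idem]

theorem nf_idem (l : List Char) :
    PySem.Chars.lower (PySem.Chars.strip (PySem.Chars.lower (PySem.Chars.strip l))) =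
      PySem.Chars.lower (PySem.Chars.strip l) := by
  have : PySem.Chars.strip (PySem.Chars.lower (PySem.Chars.strip l)) =
      PySem.Chars.lower (PySem.Chars.strip (PySem.Chars.strip l)) := by
    unfold PySem.Chars.strip
    rw [lstrip_lower, rstrip_lower]
  rw [this, strip_fix, lower_lower]

-- the shared normalizer is idempotent
theorem pvNorm_idem (x : String) : pvNorm (pvNorm x) = pvNorm x := by
  unfold pvNorm
  simp only [PySem.Str.lower, PySem.Str.strip, String.toList_ofList]
  rw [nf_idem]

-- Bool: does some character of sw equal g (as a 1-char string)?
def memS (sw : String) (g : String) : Bool := sw.toList.any (fun c => String.singleton c == g)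

-- structural (cons) recursion computing A's result on a suffix list
def ASpec (sw : String) : List String → List String
  | [] => []
  | x :: t =>
    let g := pvNorm x
    let rest := ASpec sw t
    if g = "" then rest
    else if memS sw g then rest
    else if rest.contains g then rest
    else g :: rest

theorem ASpec_norm (sw : String) (s : List String) :
    ∀ y ∈ ASpec sw s, pvNorm y = y := by
  induction s with
  | nil => simp [ASpec]
  | cons x t ih =>
    intro y hy
    simp only [ASpec] at hy
    split_ifs at hy with h1 h2 h3
    · exact ih y hy
    · exact ih y hy
    · exact ih y hy
    · rcases List.mem_cons.mp hy with h | h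
      · subst h; exact pvNorm_idem x
      · exact ih y h

theorem mem_ASpec (sw : String) (s : List String) (y : String) :
    y ∈ ASpec sw s ↔ (y ∈ s.map pvNorm ∧ ¬ (y = "" ∨ memS sw y)) := by
  induction s with
  | nil => simp [ASpec]
  | cons x t ih =>
    simp only [ASpec, List.map_cons, List.mem_cons]
    split_ifs with h1 h2 h3
    · rw [ih]
      constructor
      · rintro ⟨hm, hg⟩; exact ⟨Or.inr hm, hg⟩
      · rintro ⟨hm | hm, hg⟩
        · exfalso; subst hm; exact hg (Or.inl h1)
        · exact ⟨hm, hg⟩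
    · rw [ih]
      constructor
      · rintro ⟨hm, hg⟩; exact ⟨Or.inr hm, hg⟩
      · rintro ⟨hm | hm, hg⟩
        · exfalso; subst hm; exact hg (Or.inr h2)
        · exact ⟨hm, hg⟩
    · rw [ih]
      constructor
      · rintro ⟨hm, hg⟩; exact ⟨Or.inr hm, hg⟩
      · rintro ⟨hm | hm, hg⟩
        · subst hm
          have := (List.contains_iff_mem).mp h3
          exact (ih.mp this)
        · exact ⟨hm, hg⟩
    · rw [List.mem_cons, ih]
      constructor
      · rintro (hy | ⟨hm, hg⟩)
        · subst hy
          exact ⟨Or.inl rfl, fun hc => hc.elim (fun he => h1 he) (fun hme => h2 hme)⟩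
        · exact ⟨Or.inr hm, hg⟩
      · rintro ⟨hm | hm, hg⟩
        · exact Or.inl hm
        · exact Or.inr ⟨hm, hg⟩

-- A's helper scans compute membership
theorem pvWordContains_eq (sw g : String) (k : Nat) :
    pvWordContains sw g (k : Int) = (sw.toList.drop k).any (fun c => String.singleton c == g) := by
  have H : ∀ n k : Nat, sw.toList.length - k ≤ n →
      pvWordContains sw g (k : Int) = (sw.toList.drop k).any (fun c => String.singleton c == g) := by
    intro n
    induction n with
    | zero =>
      intro k hk
      have hlen : sw.toList.length ≤ k := by omega
      rw [pvWordContains]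
      rw [dif_pos (by simp only [PySem.Str.len]; omega)]
      rw [List.drop_eq_nil_of_le hlen]
      simp
    | succ n ih =>
      intro k hk
      by_cases hlen : sw.toList.length ≤ k
      · rw [pvWordContains]
        rw [dif_pos (by simp only [PySem.Str.len]; omega)]
        rw [List.drop_eq_nil_of_le hlen]
        simp
      · have hklt : k < sw.toList.length := by omega
        rw [pvWordContains]
        rw [dif_neg (by simp only [PySem.Str.len]; omega)]
        have hget : PySem.Str.pyGet? sw (k : Int) = some (sw.toList[k]) := by
          simp [PySem.Str.pyGet?_natCast, List.getElem?_eq_getElem hklt]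
        rw [hget]
        have hcast : ((k : Int) + 1) = (((k + 1 : Nat)) : Int) := by push_cast; ring
        rw [List.drop_eq_getElem_cons hklt, List.any_cons, hcast, ih (k + 1) (by omega)]
        by_cases hc : String.singleton (sw.toList[k]) = g
        · simp [hc]
        · simp [hc]
  exact H _ k le_rfl

theorem pvListContains_eq (items : List String) (v : String) (k : Nat) :
    pvListContains items v (k : Int) = ((items.drop k).map pvNorm).contains v := by
  have H : ∀ n k : Nat, items.length - k ≤ n →
      pvListContains items v (k : Int) = ((items.drop k).map pvNorm).contains v := by
    intro n
    induction n with
    | zero =>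
      intro k hk
      have hlen : items.length ≤ k := by omega
      rw [pvListContains]
      rw [dif_pos (by exact_mod_cast hlen)]
      rw [List.drop_eq_nil_of_le hlen]
      simp
    | succ n ih =>
      intro k hk
      by_cases hlen : items.length ≤ k
      · rw [pvListContains]
        rw [dif_pos (by exact_mod_cast hlen)]
        rw [List.drop_eq_nil_of_le hlen]
        simp
      · have hklt : k < items.length := by omega
        rw [pvListContains]
        rw [dif_neg (by omega)]
        have hget : PySem.List.pyGet? items (k : Int) = some (items[k]) := by
          simp [List.getElem?_eq_getElem hklt]
        rw [hget]
        have hcast : ((k : Int) + 1) = (((k + 1 : Nat)) : Int) := by push_cast; ring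
        rw [List.drop_eq_getElem_cons hklt, List.map_cons, List.contains_cons, hcast,
          ih (k + 1) (by omega)]
        by_cases hc : pvNorm (items[k]) = v
        · simp [hc]
        · simp [hc]
          exact fun he => absurd he.symm hc
  exact H _ k le_rfl

theorem pvListContains_contains (items : List String) (v : String)
    (hn : ∀ y ∈ items, pvNorm y = y) :
    pvListContains items v 0 = items.contains v := by
  have h0 : ((0 : Nat) : Int) = (0 : Int) := rfl
  rw [← h0, pvListContains_eq]
  simp only [List.drop_zero]
  rw [show List.map pvNorm items = items from (List.map_congr_left hn).trans (List.map_id items)]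

-- one cons-step of A equals one step of ASpec
theorem step_eq (sw x : String) (t : List String) :
    (let g := pvNorm x
     let rest := ASpec sw t
     if g = "" then rest
     else if pvWordContains sw g 0 then rest
     else if pvListContains rest g 0 then rest
     else g :: rest) = ASpec sw (x :: t) := by
  simp only [ASpec]
  have hw : pvWordContains sw (pvNorm x) 0 = memS sw (pvNorm x) := by
    have h0 : ((0 : Nat) : Int) = (0 : Int) := rfl
    rw [← h0, pvWordContains_eq]
    simp [memS]
  have hl : pvListContains (ASpec sw t) (pvNorm x) 0 = (ASpec sw t).contains (pvNorm x) :=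
    pvListContains_contains _ _ (ASpec_norm sw t)
  rw [hw, hl]

-- A on a nonnegative index processes the drop-suffix
theorem ilr_nonneg (sw : String) (L : List String) (k : Nat) :
    incorrect_letters_rec_py sw L (k : Int) = ASpec sw (L.drop k) := by
  have H : ∀ n k : Nat, L.length - k ≤ n →
      incorrect_letters_rec_py sw L (k : Int) = ASpec sw (L.drop k) := by
    intro n
    induction n with
    | zero =>
      intro k hk
      have hlen : L.length ≤ k := by omega
      rw [incorrect_letters_rec_py]
      rw [dif_pos (by exact_mod_cast hlen)]
      rw [List.drop_eq_nil_of_le hlen]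
      rfl
    | succ n ih =>
      intro k hk
      by_cases hlen : L.length ≤ k
      · rw [incorrect_letters_rec_py]
        rw [dif_pos (by exact_mod_cast hlen)]
        rw [List.drop_eq_nil_of_le hlen]
        rfl
      · have hklt : k < L.length := by omega
        rw [incorrect_letters_rec_py]
        rw [dif_neg (by omega)]
        have hget : PySem.List.pyGet? L (k : Int) = some (L[k]) := by
          simp [List.getElem?_eq_getElem hklt]
        rw [hget]
        have hcast : ((k : Int) + 1) = (((k + 1 : Nat)) : Int) := by push_cast; ring
        rw [List.drop_eq_getElem_cons hklt]
        simp only [hcast, ih (k + 1) (by omega)]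
        exact step_eq sw (L[k]) (L.drop (k + 1))
  exact H _ k le_rfl

-- processing u ++ v equals processing v when u brings nothing new
theorem ASpec_append (sw : String) (u v : List String)
    (h : ∀ y, y ∈ u → y ∈ v) : ASpec sw (u ++ v) = ASpec sw v := by
  induction u with
  | nil => simp
  | cons x u' ih =>
    rw [List.cons_append]
    simp only [ASpec]
    rw [ih (fun y hy => h y (List.mem_cons_of_mem x hy))]
    split_ifs with h1 h2 h3
    · rfl
    · rfl
    · rfl
    · exfalso
      apply h3
      exact List.contains_iff_mem.mpr ((mem_ASpec sw v (pvNorm x)).mpr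
        ⟨List.mem_map_of_mem (h x List.mem_cons_self), fun hc => hc.elim h1 h2⟩)

-- A on a negative in-range index: the wrapped tail is subsumed by the full pass
theorem ilr_neg (sw : String) (L : List String) (k : Nat) (hk : 0 < k) (hle : k ≤ L.length) :
    incorrect_letters_rec_py sw L (-(k : Int)) = ASpec sw L := by
  have H : ∀ j : Nat, j ≤ L.length →
      incorrect_letters_rec_py sw L (-(j : Int)) = ASpec sw (L.drop (L.length - j) ++ L) := by
    intro j
    induction j with
    | zero =>
      intro _
      have h0 : (-((0 : Nat) : Int)) = ((0 : Nat) : Int) := by simp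
      rw [h0, ilr_nonneg]
      simp
    | succ j ih =>
      intro hj
      have hidx : L.length - (j + 1) < L.length := by omega
      rw [incorrect_letters_rec_py]
      rw [dif_neg (by push_cast; omega)]
      have hget : PySem.List.pyGet? L (-((j + 1 : Nat) : Int)) = some (L[L.length - (j + 1)]) := by
        rw [PySem.List.pyGet?_neg_natCast L (j + 1) (by omega) (by omega)]
        exact List.getElem?_eq_getElem hidx
      rw [hget]
      have hcast : (-((j + 1 : Nat) : Int) + 1) = -((j : Nat) : Int) := by push_cast; ring
      rw [hcast, ih (by omega)]
      have hdrop : L.drop (L.length - (j + 1)) ++ L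
          = L[L.length - (j + 1)] :: (L.drop (L.length - j) ++ L) := by
        rw [List.drop_eq_getElem_cons hidx]
        have : L.length - (j + 1) + 1 = L.length - j := by omega
        rw [this, List.cons_append]
      rw [hdrop]
      exact step_eq sw (L[L.length - (j + 1)]) (L.drop (L.length - j) ++ L)
  rw [H k hle]
  exact ASpec_append sw _ L (fun y hy => List.mem_of_mem_drop hy)

-- B-side: the secret character set computes memS
theorem contains_secret (sw g : String) :
    PySem.Set.contains (PySem.Set.ofList (sw.toList.map (fun c => String.singleton c))) g
      = memS sw g := by
  rw [Bool.eq_iff_iff]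
  unfold PySem.Set.contains
  rw [List.contains_iff_mem, memS, List.any_eq_true]
  constructor
  · intro hmem
    have := (PySem.Set.mem_ofList _ _).mp hmem
    obtain ⟨c, hc, he⟩ := List.mem_map.mp this
    exact ⟨c, hc, by simp [he]⟩
  · rintro ⟨c, hc, he⟩
    exact (PySem.Set.mem_ofList _ _).mpr (List.mem_map.mpr ⟨c, hc, by simpa using he⟩)

-- B's loop body, with the set membership rewritten to memS
def stepB (sw : String) (res : List String) (x : String) : List String :=
  let g := pvNorm x
  if g = "" || memS sw g then res
  else
    let res1 := if res.contains g then (PySem.List.remove? res g).getD res else res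
    res1 ++ [g]

theorem foldl_stepB (sw : String) (s : List String) :
    ∀ acc : List String, acc.Nodup →
      s.foldl (stepB sw) acc
        = acc.filter (fun y => !(ASpec sw s).contains y) ++ ASpec sw s := by
  induction s with
  | nil =>
    intro acc _
    simp [ASpec]
  | cons x t ih =>
    intro acc hacc
    rw [List.foldl_cons]
    by_cases h1 : pvNorm x = ""
    · rw [show stepB sw acc x = acc from by simp [stepB, h1]]
      rw [ih acc hacc]
      simp only [ASpec]
      rw [if_pos h1]
    · by_cases h2 : memS sw (pvNorm x) = true
      · rw [show stepB sw acc x = acc from by simp [stepB, h2]]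
        rw [ih acc hacc]
        simp only [ASpec]
        rw [if_neg h1, if_pos h2]
      · have hres : (if acc.contains (pvNorm x) then (PySem.List.remove? acc (pvNorm x)).getD acc else acc)
            = acc.filter (fun y => y != pvNorm x) := by
          by_cases hc : acc.contains (pvNorm x)
          · rw [if_pos hc]
            rw [PySem.List.remove?_eq_some_erase acc (pvNorm x) (List.contains_iff_mem.mp hc)]
            rw [Option.getD_some]
            exact hacc.erase_eq_filter (pvNorm x)
          · rw [if_neg hc]
            symm
            apply List.filter_eq_self.mpr
            intro y hy
            simp only [bne_iff_ne, ne_eq, decide_eq_true_eq]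
            intro hyg
            subst hyg
            exact hc (List.contains_iff_mem.mpr hy)
        have hstep : stepB sw acc x = acc.filter (fun y => y != pvNorm x) ++ [pvNorm x] := by
          rw [stepB]
          rw [if_neg (by simp [h1, h2])]
          show (if acc.contains (pvNorm x) then (PySem.List.remove? acc (pvNorm x)).getD acc else acc) ++ [pvNorm x] = _
          rw [hres]
        rw [hstep]
        have hnodup' : (acc.filter (fun y => y != pvNorm x) ++ [pvNorm x]).Nodup := by
          refine List.Nodup.append (hacc.filter _) (List.nodup_singleton _) ?_
          rw [List.disjoint_singleton]
          intro hmem'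
          have hp := List.of_mem_filter (p := fun y => y != pvNorm x) hmem'
          simp at hp
        rw [ih _ hnodup']
        rw [List.filter_append]
        simp only [ASpec]
        rw [if_neg h1, if_neg h2]
        by_cases hmem : (ASpec sw t).contains (pvNorm x)
        · rw [if_pos hmem]
          have hfg : ([pvNorm x].filter (fun y => !(ASpec sw t).contains y)) = [] := by
            rw [List.filter_singleton, hmem]
            rfl
          rw [hfg, List.append_nil]
          refine congrArg (fun z => z ++ ASpec sw t) ?_
          rw [List.filter_filter]
          apply List.filter_congr
          intro y _
          by_cases hyg : y = pvNorm x
          · subst hyg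
            rw [hmem]
            simp
          · rw [bne_iff_ne.mpr hyg, Bool.and_true]
        · rw [if_neg hmem]
          have hfg : ([pvNorm x].filter (fun y => !(ASpec sw t).contains y)) = [pvNorm x] := by
            rw [List.filter_singleton]
            rw [Bool.eq_false_iff.mpr hmem]
            rfl
          rw [hfg]
          rw [List.filter_filter]
          rw [List.append_assoc]
          have hpred : ∀ y ∈ acc,
              (!(ASpec sw t).contains y && (y != pvNorm x))
                = !((pvNorm x :: ASpec sw t).contains y) := by
            intro y _
            rw [List.contains_cons, Bool.not_or]
            by_cases hyg : y = pvNorm x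
            · subst hyg
              rw [bne_self_eq_false, Bool.and_false, beq_self_eq_true, Bool.not_true, Bool.false_and]
            · rw [bne_iff_ne.mpr hyg, Bool.and_true, beq_eq_false_iff_ne.mpr hyg, Bool.not_false,
                Bool.true_and]
          rw [List.filter_congr hpred]
          rfl

theorem alt_eq_ASpec (sw : String) (L : List String) (i : Int) :
    incorrect_letters_rec_py_alt sw L i = ASpec sw (L.drop (max i 0).toNat) := by
  show (PySem.List.slice L (some (max i 0)) none).foldl
      (fun (res : List String) (x : String) =>
        let g := pvNorm x
        if g = "" || PySem.Set.contains
            (PySem.Set.ofList (sw.toList.map (fun c => String.singleton c))) g then res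
        else
          let res1 := if res.contains g then (PySem.List.remove? res g).getD res else res
          res1 ++ [g]) []
    = ASpec sw (L.drop (max i 0).toNat)
  rw [PySem.List.slice_from L (le_max_right i 0)]
  have hfun : (fun (res : List String) (x : String) =>
      let g := pvNorm x
      if g = "" || PySem.Set.contains
          (PySem.Set.ofList (sw.toList.map (fun c => String.singleton c))) g then res
      else
        let res1 := if res.contains g then (PySem.List.remove? res g).getD res else res
        res1 ++ [g]) = stepB sw := by
    funext res x
    rw [stepB]
    simp only [contains_secret]
  rw [hfun]
  rw [foldl_stepB sw _ [] List.nodup_nil]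
  simp

-- ===== VERDICT (by name: the statement is the Claim_ definition above) =====
theorem incorrect_letters_rec_py_spec : Claim_equal_incorrect_letters_rec_py := by
  intro sw L i _ hpre
  unfold Spec_incorrect_letters_rec_py
  unfold Pre_incorrect_letters_rec_py at hpre
  rw [alt_eq_ASpec]
  by_cases hi : 0 ≤ i
  · have h1 : max i 0 = i := by omega
    rw [h1]
    have h2 : i = ((i.toNat : Nat) : Int) := by omega
    rw [h2, ilr_nonneg]
    simp [h1]
  · have hi : i < 0 := by omega
    have hmax : (max i 0).toNat = 0 := by omega
    rw [hmax]
    simp only [List.drop_zero]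
    have : i = -((-i).toNat : Int) := by omega
    rw [this, ilr_neg sw L (-i).toNat (by omega) (by omega)]
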